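-- pv_equiv track=rewrite | github.com/pauubach/narrassist | src/narrative_assistant/nlp/extraction/extractors/regex_extractor.py | _find_last_entity
-- ===== SOURCE A (Python) =====
-- from typing import Optional
--
-- def _find_last_entity(
--
--     text: str,
--     entity_names: list[str],
-- ) -> Optional[str]:
--     """
--     Encuentra la primera entidad mencionada en el texto.
--
--     Para patrones globales sin contexto de posición,
--     retorna la primera entidad del texto (generalmente el protagonista).
--     """
--     first_entity = None
--     first_pos = len(text)
--
--     text_lower = text.lower()
--     for name in entity_names:
--         pos = text_lower.find(name.lower())
--         if pos != -1 and pos < first_pos: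
--             first_pos = pos
--             first_entity = name
--
--     return first_entity
-- ===== SOURCE B (Python) =====
-- from typing import Optional
--
--
-- def _find_last_entity(
--     text: str,
--     entity_names: list[str],
-- ) -> Optional[str]:
--     """Single left-to-right scan over text positions: at the first position
--     where any (lowercased) name starts, return the first such name in list order."""
--     low = text.lower()
--     lows = [n.lower() for n in entity_names]
--     for i in range(len(low)):
--         for name, nl in zip(entity_names, lows):
--             if low.startswith(nl, i):
--                 return name
--     return None
-- ===== Notes on version B (the rewrite author's own statement) =====
-- stated objective: faster
-- what changed: A runs a full-text lowercase find for every name and tracks the running minimum position; B scans text positions left to right once and returns at the first position where any lowercased name starts (first such name in list order), so it stops as soon as the earliest mention is found instead of scanning the whole text for every name.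
import Mathlib
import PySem

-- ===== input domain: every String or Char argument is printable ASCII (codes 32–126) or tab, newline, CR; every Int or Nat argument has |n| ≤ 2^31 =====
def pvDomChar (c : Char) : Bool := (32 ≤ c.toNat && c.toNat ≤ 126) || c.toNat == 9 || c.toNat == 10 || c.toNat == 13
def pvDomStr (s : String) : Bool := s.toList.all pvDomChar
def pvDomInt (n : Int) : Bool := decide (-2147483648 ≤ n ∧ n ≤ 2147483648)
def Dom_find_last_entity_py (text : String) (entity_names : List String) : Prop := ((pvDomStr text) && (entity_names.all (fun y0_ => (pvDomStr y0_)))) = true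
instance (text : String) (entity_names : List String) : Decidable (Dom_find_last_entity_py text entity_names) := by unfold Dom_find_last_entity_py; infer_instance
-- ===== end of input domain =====

-- B replaces A's per-name full-text `find` scans (track the minimum position) by a single
-- left-to-right scan over text positions that returns at the first position where any
-- lowercased name starts (first such name in list order), exiting early at the earliest mention.


-- ===== PORT A =====
-- first_pos starts at len(text); for each name, pos = text_lower.find(name.lower());
-- update (first_pos, first_entity) when pos != -1 and pos < first_pos.
def find_last_entity_py (text : String) (entity_names : List String) : Option String :=
  let text_lower := PySem.Str.lower text
  (entity_names.foldl
      (fun (st : Int × Option String) name =>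
        let pos := PySem.Str.find text_lower (PySem.Str.lower name)
        if pos ≠ -1 ∧ pos < st.1 then (pos, some name) else st)
      (PySem.Str.len text, none)).2

-- ===== PORT B =====
-- first name (in list order) whose lowered form starts at position i (low.startswith(nl, i))
def pvFirstMatch : List (String × List Char) → List Char → Option String
  | [], _ => none
  | (name, nl) :: rest, s =>
      if PySem.Chars.startswith s nl then some name else pvFirstMatch rest s

-- for i in range(len(low)): scan positions left to right, return on the first match
def pvScan (pairs : List (String × List Char)) : List Char → Option String
  | [] => none
  | c :: rest =>
      match pvFirstMatch pairs (c :: rest) with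
      | some n => some n
      | none => pvScan pairs rest

def find_last_entity_py_alt (text : String) (entity_names : List String) : Option String :=
  let low := PySem.Chars.lower text.toList
  let pairs := entity_names.map (fun n => (n, PySem.Chars.lower n.toList))
  pvScan pairs low

-- ===== PRECONDITION & SPEC =====
def Spec_find_last_entity_py (text : String) (entity_names : List String) (out : Option String) : Prop := out = find_last_entity_py_alt text entity_names
instance (text : String) (entity_names : List String) (out : Option String) : Decidable (Spec_find_last_entity_py text entity_names out) := by unfold Spec_find_last_entity_py; infer_instance

-- ===== CLAIM (what is proved, stated in full; the proofs are below) =====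
def Claim_equal_find_last_entity_py : Prop := ∀ (text : String) (entity_names : List String), Dom_find_last_entity_py text entity_names → Spec_find_last_entity_py text entity_names (find_last_entity_py text entity_names)

-- ===== LEMMAS AND PROOFS =====

-- A's fold leaves the state unchanged when no remaining name beats the current minimum
theorem pvFoldA_none (f : String → Int) (names : List String) (fp : Int) (fe : Option String)
    (h : ∀ n ∈ names, ¬(f n ≠ -1 ∧ f n < fp)) :
    names.foldl (fun (st : Int × Option String) n =>
        if f n ≠ -1 ∧ f n < st.1 then (f n, some n) else st) (fp, fe) = (fp, fe) := by
  induction names with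
  | nil => rfl
  | cons x xs ih =>
      simp only [List.foldl_cons]
      rw [if_neg (h x (by simp))]
      exact ih (fun n hn => h n (by simp [hn]))

-- A's fold returns the first name attaining the minimum found position
theorem pvFoldA_min (f : String → Int) (l r : List String) (m : String) (fp : Int) (fe : Option String)
    (hm : f m ≠ -1 ∧ f m < fp)
    (hl : ∀ x ∈ l, f x = -1 ∨ f m < f x ∨ fp ≤ f x)
    (hr : ∀ x ∈ r, f x = -1 ∨ f m ≤ f x ∨ fp ≤ f x) :
    (l ++ m :: r).foldl (fun (st : Int × Option String) n =>
        if f n ≠ -1 ∧ f n < st.1 then (f n, some n) else st) (fp, fe) = (f m, some m) := by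
  induction l generalizing fp fe with
  | nil =>
      simp only [List.nil_append, List.foldl_cons]
      rw [if_pos hm]
      exact pvFoldA_none f r (f m) (some m) (fun n hn => by
        rcases hr n hn with h1 | h1 | h1 <;> simp_all <;> omega)
  | cons x xs ih =>
      simp only [List.cons_append, List.foldl_cons]
      by_cases hx : f x ≠ -1 ∧ f x < fp
      · rcases hl x (by simp) with h1 | h1 | h1
        · exact absurd h1 hx.1
        · rw [if_pos hx]
          refine ih (f x) (some x) ⟨hm.1, h1⟩ ?_ ?_
          · intro y hy
            rcases hl y (by simp [hy]) with h2 | h2 | h2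
            · exact Or.inl h2
            · exact Or.inr (Or.inl h2)
            · exact Or.inr (Or.inr (by omega))
          · intro y hy
            rcases hr y hy with h2 | h2 | h2
            · exact Or.inl h2
            · exact Or.inr (Or.inl h2)
            · exact Or.inr (Or.inr (by omega))
        · omega
      · rw [if_neg hx]
        exact ih fp fe hm
          (fun y hy => hl y (by simp [hy]))
          hr

-- pvFirstMatch is `none` iff no name's lowered form is a prefix of s
theorem pvFirstMatch_none_iff (names : List String) (s : List Char) :
    pvFirstMatch (names.map (fun n => (n, PySem.Chars.lower n.toList))) s = none ↔
      ∀ n ∈ names, ¬ (PySem.Chars.lower n.toList <+: s) := by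
  induction names with
  | nil => simp [pvFirstMatch]
  | cons x xs ih =>
      simp only [List.map_cons, pvFirstMatch]
      by_cases hx : PySem.Chars.startswith s (PySem.Chars.lower x.toList) = true
      · rw [if_pos hx]
        simp only [PySem.Chars.startswith_iff] at hx
        simp [hx]
      · rw [if_neg hx]
        simp only [PySem.Chars.startswith_iff] at hx
        constructor
        · intro h n hn
          rw [List.mem_cons] at hn
          rcases hn with hn | hn
          · subst hn
            intro hc
            exact hx hc
          · exact (ih.mp h) n hn
        · intro h
          exact ih.mpr (fun n hn => h n (by simp [hn]))

-- pvFirstMatch returns the first matching name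
theorem pvFirstMatch_some (l r : List String) (m : String) (s : List Char)
    (hm : PySem.Chars.lower m.toList <+: s)
    (hl : ∀ x ∈ l, ¬ (PySem.Chars.lower x.toList <+: s)) :
    pvFirstMatch ((l ++ m :: r).map (fun n => (n, PySem.Chars.lower n.toList))) s = some m := by
  induction l with
  | nil =>
      simp only [List.nil_append, List.map_cons, pvFirstMatch]
      rw [if_pos ((PySem.Chars.startswith_iff s _).mpr hm)]
  | cons x xs ih =>
      simp only [List.cons_append, List.map_cons, pvFirstMatch]
      rw [if_neg (by
        intro hc
        exact hl x (by simp) ((PySem.Chars.startswith_iff s _).mp hc))]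
      exact ih (fun y hy => hl y (by simp [hy]))

-- pvScan is `none` when no position matches
theorem pvScan_none (pairs : List (String × List Char)) (s : List Char)
    (h : ∀ k < s.length, pvFirstMatch pairs (s.drop k) = none) :
    pvScan pairs s = none := by
  induction s with
  | nil => rfl
  | cons c rest ih =>
      have h0 := h 0 (by simp)
      simp only [List.drop_zero] at h0
      simp only [pvScan, h0]
      exact ih (fun k hk => h (k + 1) (by simpa using Nat.succ_lt_succ hk))

-- pvScan returns the first match at the earliest matching position
theorem pvScan_some (pairs : List (String × List Char)) (s : List Char) (k : Nat) (m : String)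
    (hk : k < s.length)
    (hsome : pvFirstMatch pairs (s.drop k) = some m)
    (hmin : ∀ j < k, pvFirstMatch pairs (s.drop j) = none) :
    pvScan pairs s = some m := by
  induction s generalizing k with
  | nil => simp at hk
  | cons c rest ih =>
      cases k with
      | zero =>
          simp only [List.drop_zero] at hsome
          simp only [pvScan, hsome]
      | succ k' =>
          have h0 := hmin 0 (Nat.succ_pos _)
          simp only [List.drop_zero] at h0
          simp only [pvScan, h0]
          exact ih k' (by simpa using hk)
            (by simpa using hsome)
            (fun j hj => by simpa using hmin (j + 1) (by omega))

-- if some element of a list satisfies P, the list splits at the FIRST such element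
theorem pvExistsFirst {P : String → Prop} [DecidablePred P] (names : List String)
    (h : ∃ n ∈ names, P n) :
    ∃ l m r, names = l ++ m :: r ∧ P m ∧ ∀ x ∈ l, ¬ P x := by
  induction names with
  | nil => simp at h
  | cons x xs ih =>
      by_cases hx : P x
      · exact ⟨[], x, xs, rfl, hx, by simp⟩
      · obtain ⟨n, hn, hPn⟩ := h
        rw [List.mem_cons] at hn
        rcases hn with hn | hn
        · exact absurd (hn ▸ hPn) hx
        · obtain ⟨l, m, r, heq, hPm, hl⟩ := ih ⟨n, hn, hPn⟩
          exact ⟨x :: l, m, r, by simp [heq], hPm, by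
            intro y hy
            rw [List.mem_cons] at hy
            rcases hy with hy | hy
            · exact hy ▸ hx
            · exact hl y hy⟩

-- ===== VERDICT (by name: the statement is the Claim_ definition above) =====
theorem find_last_entity_py_spec : Claim_equal_find_last_entity_py := by
  classical
  intro text names _hdom
  unfold Spec_find_last_entity_py find_last_entity_py find_last_entity_py_alt
  simp only [PySem.Str.find_eq, PySem.Str.toList_lower, PySem.Str.len_eq]
  set low := PySem.Chars.lower text.toList with hlow
  have hlen : low.length = text.toList.length := by simp [hlow, PySem.Chars.lower]
  by_cases hex : ∃ i, i < low.length ∧ ∃ n ∈ names, PySem.Chars.lower n.toList <+: low.drop i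
  · -- a match exists: both return the first name matching at the earliest position
    set f : String → Int := fun n => PySem.Chars.find low (PySem.Chars.lower n.toList) with hf
    have hfge : ∀ n : String, -1 ≤ f n := fun n => PySem.Chars.neg_one_le_find low (PySem.Chars.lower n.toList)
    set i := Nat.find hex with hi_def
    obtain ⟨hilen, hiname⟩ : i < low.length ∧ ∃ n ∈ names, PySem.Chars.lower n.toList <+: low.drop i :=
      Nat.find_spec hex
    obtain ⟨l, m, r, heq, hPm, hlnone⟩ :=
      pvExistsFirst (P := fun n => PySem.Chars.lower n.toList <+: low.drop i) names hiname
    -- any name's first occurrence is < len(low) and, for names in the list, ≥ i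
    have hq_lt : ∀ n : String, 0 ≤ f n → (f n).toNat < low.length := by
      intro n hnn
      obtain ⟨hpre_at, _⟩ := PySem.Chars.find_spec (s := low) (sub := PySem.Chars.lower n.toList) hnn
      rcases Nat.lt_or_ge (f n).toNat low.length with h | h
      · exact h
      · exfalso
        have hle : f n ≤ (low.length : Int) := PySem.Chars.find_le_length low _
        have heqn : (f n).toNat = low.length := by omega
        have hnil : PySem.Chars.lower n.toList = [] := by
          refine List.prefix_nil.mp ?_
          have hdrop : low.drop (f n).toNat = [] := by rw [heqn]; simp
          rwa [hdrop] at hpre_at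
        have : f n = 0 := by rw [hf]; simp only [hnil, PySem.Chars.find_nil]
        omega
    have hge : ∀ n ∈ names, 0 ≤ f n → (i : Int) ≤ f n := by
      intro n hn hnn
      obtain ⟨hpre_at, _⟩ := PySem.Chars.find_spec (s := low) (sub := PySem.Chars.lower n.toList) hnn
      by_contra hcon
      push_neg at hcon
      have hlt : (f n).toNat < i := by omega
      exact Nat.find_min hex hlt ⟨hq_lt n hnn, n, hn, hpre_at⟩
    have hpos : ∀ n : String, PySem.Chars.lower n.toList <+: low.drop i → 0 ≤ f n := by
      intro n hpre
      rw [hf, PySem.Chars.find_nonneg_iff]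
      exact (List.IsPrefix.isInfix hpre).trans (List.drop_suffix i low).isInfix
    have heq_i : ∀ n ∈ names, PySem.Chars.lower n.toList <+: low.drop i → f n = (i : Int) := by
      intro n hn hpre
      have hnn := hpos n hpre
      obtain ⟨_, hmin_at⟩ := PySem.Chars.find_spec (s := low) (sub := PySem.Chars.lower n.toList) hnn
      have h1 : (f n).toNat ≤ i := by
        by_contra hcon
        push_neg at hcon
        exact hmin_at i hcon hpre
      have h2 := hge n hn hnn
      omega
    have hmem_m : m ∈ names := by rw [heq]; simp
    have hfm : f m = (i : Int) := heq_i m hmem_m hPm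
    -- A's side: the fold finds (i, some m)
    have hA : names.foldl
        (fun (st : Int × Option String) name =>
          if f name ≠ -1 ∧ f name < st.1 then (f name, some name) else st)
        ((text.toList.length : Int), none) = ((i : Int), some m) := by
      rw [heq, ← hfm]
      refine pvFoldA_min f l r m _ none ⟨by omega, by rw [hfm]; omega⟩ ?_ ?_
      · intro x hx
        by_cases hne : f x = -1
        · exact Or.inl hne
        · have hnn : 0 ≤ f x := by
            have := hfge x; omega
          have hxi : (i : Int) ≤ f x := hge x (by rw [heq]; simp [hx]) hnn
          have hxne : f x ≠ (i : Int) := by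
            intro hc
            obtain ⟨hpre_at, _⟩ := PySem.Chars.find_spec (s := low) (sub := PySem.Chars.lower x.toList) hnn
            have : (f x).toNat = i := by omega
            exact hlnone x hx (this ▸ hpre_at)
          exact Or.inr (Or.inl (by omega))
      · intro x hx
        by_cases hne : f x = -1
        · exact Or.inl hne
        · have hnn : 0 ≤ f x := by
            have := hfge x; omega
          exact Or.inr (Or.inl (by have := hge x (by rw [heq]; simp [hx]) hnn; omega))
    -- B's side: the scan finds m at position i
    have hB : pvScan (names.map (fun n => (n, PySem.Chars.lower n.toList))) low = some m := by
      refine pvScan_some _ low i m hilen ?_ ?_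
      · rw [heq]
        exact pvFirstMatch_some l r m (low.drop i) hPm hlnone
      · intro j hj
        rw [pvFirstMatch_none_iff]
        intro n hn hpre
        exact Nat.find_min hex hj ⟨by omega, n, hn, hpre⟩
    rw [hA, hB]
  · -- no match anywhere: both return none
    push_neg at hex
    have hnone : ∀ n ∈ names, ¬(PySem.Chars.find low (PySem.Chars.lower n.toList) ≠ -1 ∧
        PySem.Chars.find low (PySem.Chars.lower n.toList) < (text.toList.length : Int)) := by
      rintro n hn ⟨hne, hlt⟩
      have hnn : 0 ≤ PySem.Chars.find low (PySem.Chars.lower n.toList) := by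
        have := PySem.Chars.neg_one_le_find low (PySem.Chars.lower n.toList); omega
      obtain ⟨hpre_at, _⟩ := PySem.Chars.find_spec (s := low) (sub := PySem.Chars.lower n.toList) hnn
      have hq : (PySem.Chars.find low (PySem.Chars.lower n.toList)).toNat < low.length := by omega
      exact hex _ hq n hn hpre_at
    have hA := pvFoldA_none (fun n => PySem.Chars.find low (PySem.Chars.lower n.toList))
      names (text.toList.length : Int) none hnone
    have hB : pvScan (names.map (fun n => (n, PySem.Chars.lower n.toList))) low = none := by
      refine pvScan_none _ low ?_
      intro k hk
      rw [pvFirstMatch_none_iff]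
      intro n hn hpre
      exact hex k hk n hn hpre
    rw [hA, hB]
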